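-- pv_equiv track=rewrite | github.com/joyaseem01/money | find_odd_consevative.py | find_consecutive_odd_numbers_with_index
-- ===== SOURCE A (Python) =====
-- def find_consecutive_odd_numbers_with_index(numbers):
--     count = 0
--     start_index = None
--
--     for i, num in enumerate(numbers):
--         if num % 2 != 0 or num == 0:
--             if count == 0:
--                 start_index = i
--             count += 1
--             if count == 3:
--                 return True, start_index
--         else:
--             count = 0
-- ===== SOURCE B (Python) =====
-- def find_consecutive_odd_numbers_with_index(numbers):
--     xs = list(numbers)
--     for i, (a, b, c) in enumerate(zip(xs, xs[1:], xs[2:])):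
--         if (a % 2 != 0 or a == 0) and (b % 2 != 0 or b == 0) and (c % 2 != 0 or c == 0):
--             return True, i
-- ===== Notes on version B (the rewrite author's own statement) =====
-- stated objective: alternative
-- what changed: Replaced the resetting run-counter state machine by a stateless scan over windows of three consecutive elements (zip of three shifted views), returning the first index whose whole window satisfies the odd-or-zero predicate.
import Mathlib
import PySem

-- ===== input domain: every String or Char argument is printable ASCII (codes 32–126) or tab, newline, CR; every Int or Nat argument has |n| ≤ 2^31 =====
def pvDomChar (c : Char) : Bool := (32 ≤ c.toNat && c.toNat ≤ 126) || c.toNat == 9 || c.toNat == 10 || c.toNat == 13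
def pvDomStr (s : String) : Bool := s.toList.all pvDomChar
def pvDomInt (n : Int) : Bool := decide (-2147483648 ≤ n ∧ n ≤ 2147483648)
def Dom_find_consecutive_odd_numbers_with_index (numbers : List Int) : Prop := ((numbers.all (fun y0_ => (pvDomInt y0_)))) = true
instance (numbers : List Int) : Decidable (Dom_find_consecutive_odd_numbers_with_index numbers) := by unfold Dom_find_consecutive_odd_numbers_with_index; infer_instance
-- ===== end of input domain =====

-- B replaces A's resetting run-counter by a stateless scan over windows of three
-- consecutive elements; return value equivalence is proved (neither mutates its input).

-- ===== PORT A =====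
-- the shared test `num % 2 != 0 or num == 0` (Python % with positive divisor = PySem.Int.mod)
def pvPred (x : Int) : Bool := (PySem.Int.mod x 2 != 0) || (x == 0)

-- the loop of A: state = (index i, count, start_index)
def pvGoA : List Int → Int → Nat → Option Int → Option (Bool × Int)
  | [], _, _, _ => none
  | num :: rest, i, count, start_index =>
    if pvPred num then
      let si := if count = 0 then some i else start_index
      if count + 1 = 3 then some (true, si.getD 0)  -- si is always `some` here (count was 2, so it was set earlier)
      else pvGoA rest (i + 1) (count + 1) si
    else pvGoA rest (i + 1) 0 start_index

def find_consecutive_odd_numbers_with_index (numbers : List Int) : Option (Bool × Int) :=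
  pvGoA numbers 0 0 none

-- ===== PORT B =====
-- Source B's `for i, (a,b,c) in enumerate(zip(xs, xs[1:], xs[2:]))`: successive windows of three
def pvGoB : List Int → Int → Option (Bool × Int)
  | a :: b :: c :: rest, i =>
    if pvPred a && pvPred b && pvPred c then some (true, i)
    else pvGoB (b :: c :: rest) (i + 1)
  | _, _ => none

def find_consecutive_odd_numbers_with_index_alt (numbers : List Int) : Option (Bool × Int) :=
  pvGoB numbers 0

-- ===== PRECONDITION & SPEC =====
def Spec_find_consecutive_odd_numbers_with_index (numbers : List Int) (out : Option (Bool × Int)) : Prop := out = find_consecutive_odd_numbers_with_index_alt numbers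
instance (numbers : List Int) (out : Option (Bool × Int)) : Decidable (Spec_find_consecutive_odd_numbers_with_index numbers out) := by unfold Spec_find_consecutive_odd_numbers_with_index; infer_instance

-- ===== CLAIM (what is proved, stated in full; the proofs are below) =====
def Claim_equal_find_consecutive_odd_numbers_with_index : Prop := ∀ (numbers : List Int), Dom_find_consecutive_odd_numbers_with_index numbers → Spec_find_consecutive_odd_numbers_with_index numbers (find_consecutive_odd_numbers_with_index numbers)

-- ===== LEMMAS AND PROOFS =====

lemma pvGoB_step1 (a : Int) (l : List Int) (i : Int) (h : pvPred a = false) :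
    pvGoB (a :: l) i = pvGoB l (i + 1) := by
  match l with
  | [] => simp [pvGoB]
  | [b] => simp [pvGoB]
  | b :: c :: rest => simp [pvGoB, h]

lemma pvGoB_step2 (a x : Int) (l : List Int) (i : Int) (h : pvPred x = false) :
    pvGoB (a :: x :: l) i = pvGoB l (i + 2) := by
  match l with
  | [] => simp [pvGoB]
  | c :: rest =>
    have : pvGoB (a :: x :: c :: rest) i = pvGoB (x :: c :: rest) (i + 1) := by
      simp [pvGoB, h]
    rw [this, pvGoB_step1 _ _ _ h]
    ring_nf

lemma pvGoA_eq_pvGoB :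
    ∀ (xs p : List Int) (i : Int) (si : Option Int),
      p.length ≤ 2 → (∀ y ∈ p, pvPred y = true) →
      (p = [] ∨ si = some (i - p.length)) →
      pvGoA xs i p.length si = pvGoB (p ++ xs) (i - p.length) := by
  intro xs
  induction xs with
  | nil =>
    intro p i si hlen _ _
    match p, hlen with
    | [], _ => simp [pvGoA, pvGoB]
    | [a], _ => simp [pvGoA, pvGoB]
    | [a, b], _ => simp [pvGoA, pvGoB]
  | cons x rest ih =>
    intro p i si hlen hall hsi
    by_cases hp : pvPred x = true
    · match p, hlen with
      | [a, b], _ =>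
        -- count = 2: A returns here; B's first window (a, b, x) passes
        rcases hsi with h | h
        · simp at h
        · have ha := hall a (by simp)
          have hb := hall b (by simp)
          simp at h
          simp [pvGoA, pvGoB, hp, ha, hb, h]
      | [], _ =>
        have h0 := ih [x] (i + 1) (some i) (by simp) (by simpa using hp)
          (by right; simp)
        simp [pvGoA, hp]
        simp at h0
        convert h0 using 2
      | [a], _ =>
        rcases hsi with h | h
        · simp at h
        · simp at h
          have ha := hall a (by simp)
          have h0 := ih [a, x] (i + 1) si (by simp)
            (by intro y hy; simp at hy; rcases hy with rfl | rfl
                · exact ha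
                · exact hp)
            (by right; rw [h]; simp; omega)
          simp [pvGoA, hp, h] at h0 ⊢
          convert h0 using 2
          omega
    · have hpf : pvPred x = false := by simpa using hp
      have hrest := ih [] (i + 1) si (by simp) (by simp) (Or.inl rfl)
      simp at hrest
      match p, hlen with
      | [], _ =>
        simp [pvGoA, hpf]
        rw [pvGoB_step1 _ _ _ hpf]
        simpa using hrest
      | [a], _ =>
        simp [pvGoA, hpf]
        rw [pvGoB_step2 _ _ _ _ hpf]
        convert hrest using 2
        omega
      | [a, b], _ =>
        simp [pvGoA, hpf]
        have h1 : pvGoB (a :: b :: x :: rest) (i - 2) = pvGoB (b :: x :: rest) (i - 2 + 1) := by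
          simp [pvGoB, hpf]
        rw [h1, pvGoB_step2 _ _ _ _ hpf]
        convert hrest using 2
        omega

-- ===== VERDICT (by name: the statement is the Claim_ definition above) =====
theorem find_consecutive_odd_numbers_with_index_spec : Claim_equal_find_consecutive_odd_numbers_with_index := by
  intro numbers _
  unfold Spec_find_consecutive_odd_numbers_with_index
  unfold find_consecutive_odd_numbers_with_index find_consecutive_odd_numbers_with_index_alt
  have := pvGoA_eq_pvGoB numbers [] 0 none (by simp) (by simp) (Or.inl rfl)
  simpa using this
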